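-- pv_equiv track=rewrite | github.com/heeeoneee/cue_sheet_checker | 2_schedule_check.py | find_available_helpers
-- ===== SOURCE A (Python) =====
-- def find_available_helpers(target_day, start_search_time, end_search_time, all_helpers, assigned_schedules):
--     """
--     ❗ [기능 추가] 특정 요일과 '시간 간격'에 투입 가능한 인원을 찾습니다.
--     (기존의 특정 시점 검색은 이 함수를 활용하여 처리)
--     """
--     # 1. 해당 요일에 참여 가능한 인원 필터링
--     available_on_day = {name for name, data in all_helpers.items() if target_day in data['days']}
--
--     # 2. 해당 시간 간격과 겹치는 일정이 있는 인원(배정 불가 인원) 찾기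
--     unavailable_helpers = set()
--     for helper, schedules in assigned_schedules.items():
--         for day, start_assigned, end_assigned, _ in schedules:
--             # 요일이 같고, 검색 시간 간격과 배정된 시간이 겹치면 배정 불가
--             # 겹치는 조건: 내 일정 시작시간 < 검색 종료시간 AND 검색 시작시간 < 내 일정 종료시간
--             if day == target_day and start_assigned < end_search_time and start_search_time < end_assigned:
--                 unavailable_helpers.add(helper)
--
--     # 3. 참여 가능 인원에서 배정 불가 인원을 제외하여 최종 목록 생성
--     final_available_list = sorted(list(available_on_day - unavailable_helpers))
--     return final_available_list
-- ===== SOURCE B (Python) =====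
-- def find_available_helpers(target_day, start_search_time, end_search_time, all_helpers, assigned_schedules):
--     # Sort-then-merge: build two sorted lists (day-available candidates, busy helpers)
--     # and subtract one from the other with a two-pointer merge instead of set difference.
--     cand = sorted(name for name, data in all_helpers.items() if target_day in data['days'])
--     busy = sorted({helper for helper, schedules in assigned_schedules.items()
--                    if any(day == target_day and start_assigned < end_search_time
--                           and start_search_time < end_assigned
--                           for day, start_assigned, end_assigned, _ in schedules)})
--     result = []
--     i = j = 0
--     n, m = len(cand), len(busy)
--     while i < n:
--         while j < m and busy[j] < cand[i]:
--             j += 1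
--         if j < m and busy[j] == cand[i]:
--             i += 1
--         else:
--             result.append(cand[i])
--             i += 1
--     return result
-- ===== Notes on version B (the rewrite author's own statement) =====
-- stated objective: alternative
-- what changed: B replaces A's hash-set subtraction with a sort-then-merge algorithm: it sorts the day-available candidate names and the sorted set of busy helpers (those owning an overlapping schedule entry), then subtracts the second list from the first by a two-pointer merge scan, so the result comes out already sorted and no set-difference or final sort of the difference is needed.
import Mathlib
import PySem

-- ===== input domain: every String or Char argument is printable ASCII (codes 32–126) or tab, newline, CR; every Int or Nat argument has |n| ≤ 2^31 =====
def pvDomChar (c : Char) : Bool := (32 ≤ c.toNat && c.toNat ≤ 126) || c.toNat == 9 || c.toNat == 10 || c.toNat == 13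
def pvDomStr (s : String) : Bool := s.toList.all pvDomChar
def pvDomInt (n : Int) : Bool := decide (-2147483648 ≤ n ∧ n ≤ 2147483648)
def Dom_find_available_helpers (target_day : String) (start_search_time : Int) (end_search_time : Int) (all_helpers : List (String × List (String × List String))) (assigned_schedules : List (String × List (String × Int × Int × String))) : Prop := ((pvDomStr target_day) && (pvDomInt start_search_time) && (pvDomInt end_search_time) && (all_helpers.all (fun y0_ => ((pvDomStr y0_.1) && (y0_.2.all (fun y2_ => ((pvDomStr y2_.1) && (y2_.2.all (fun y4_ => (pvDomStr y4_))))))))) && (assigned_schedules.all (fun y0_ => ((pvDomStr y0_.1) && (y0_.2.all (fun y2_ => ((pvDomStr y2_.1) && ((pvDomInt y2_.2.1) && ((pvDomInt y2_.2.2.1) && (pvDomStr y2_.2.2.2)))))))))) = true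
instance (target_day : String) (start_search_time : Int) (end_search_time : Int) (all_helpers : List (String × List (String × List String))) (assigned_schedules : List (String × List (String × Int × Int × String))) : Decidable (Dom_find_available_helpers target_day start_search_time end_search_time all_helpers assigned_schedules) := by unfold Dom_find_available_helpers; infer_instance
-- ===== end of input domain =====

-- B sorts the candidate and busy name lists and subtracts by a two-pointer merge instead of A's set difference.


-- ===== PORT A =====
-- target_day in data['days']  (KeyError when 'days' is absent; those inputs are excluded by Pre_)
def pvHasDay (target_day : String) (data : List (String × List String)) : Bool :=
  match (PySem.Dict.ofList data).get? "days" with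
  | some days => days.contains target_day
  | none => false

-- day == target_day and start_assigned < end_search_time and start_search_time < end_assigned
def pvOverlap (target_day : String) (start_search_time : Int) (end_search_time : Int)
    (sch : String × Int × Int × String) : Bool :=
  sch.1 == target_day && decide (sch.2.1 < end_search_time) && decide (start_search_time < sch.2.2.1)

def find_available_helpers (target_day : String) (start_search_time : Int) (end_search_time : Int) (all_helpers : List (String × List (String × List String))) (assigned_schedules : List (String × List (String × Int × Int × String))) : List String :=
  let allD := PySem.Dict.ofList all_helpers
  let asgD := PySem.Dict.ofList assigned_schedules
  -- {name for name, data in all_helpers.items() if target_day in data['days']}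
  let available_on_day : PySem.Set String :=
    PySem.Set.ofList ((allD.items.filter (fun p => pvHasDay target_day p.2)).map (fun p => p.1))
  -- for helper, schedules in assigned_schedules.items(): for day, sa, ea, _ in schedules: if overlap: add
  let unavailable_helpers : PySem.Set String :=
    asgD.items.foldl (fun u pr =>
      pr.2.foldl (fun u sch =>
        if pvOverlap target_day start_search_time end_search_time sch
        then PySem.Set.add u pr.1 else u) u) PySem.Set.empty
  PySem.List.sorted (PySem.Set.diff available_on_day unavailable_helpers) (fun x => x) false

-- ===== PORT B =====
-- the two-pointer merge subtraction: the inner 'while j < m and busy[j] < cand[i]' advance is the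
-- dropWhile on the remaining busy suffix; the suffix is threaded on, never rewound (j only grows)
def pvMergeSub : List String → List String → List String
  | [], _ => []
  | c :: cs, bs =>
    let bs' := bs.dropWhile (fun b => decide (b < c))
    match bs' with
    | b :: _ => if b == c then pvMergeSub cs bs' else c :: pvMergeSub cs bs'
    | [] => c :: pvMergeSub cs bs'

def find_available_helpers_alt (target_day : String) (start_search_time : Int) (end_search_time : Int) (all_helpers : List (String × List (String × List String))) (assigned_schedules : List (String × List (String × Int × Int × String))) : List String :=
  -- cand = sorted(name for name, data in all_helpers.items() if target_day in data['days'])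
  let cand := PySem.List.sorted
    (((PySem.Dict.ofList all_helpers).items.filter (fun p => pvHasDay target_day p.2)).map (fun p => p.1))
    (fun x => x) false
  -- busy = sorted({helper for helper, schedules in assigned_schedules.items() if any(overlap)})
  let busy := PySem.List.sorted
    (PySem.Set.ofList (((PySem.Dict.ofList assigned_schedules).items.filter
      (fun pr => pr.2.any (pvOverlap target_day start_search_time end_search_time))).map (fun p => p.1)))
    (fun x => x) false
  pvMergeSub cand busy

-- ===== PRECONDITION & SPEC =====
-- Pre_ excludes only inputs where A raises KeyError: some helper's data dict lacks the 'days' key.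
def Pre_find_available_helpers (target_day : String) (start_search_time : Int) (end_search_time : Int) (all_helpers : List (String × List (String × List String))) (assigned_schedules : List (String × List (String × Int × Int × String))) : Prop :=
  ∀ h ∈ all_helpers, "days" ∈ h.2.map (fun q => q.1)
instance (target_day : String) (start_search_time : Int) (end_search_time : Int) (all_helpers : List (String × List (String × List String))) (assigned_schedules : List (String × List (String × Int × Int × String))) : Decidable (Pre_find_available_helpers target_day start_search_time end_search_time all_helpers assigned_schedules) := by unfold Pre_find_available_helpers; infer_instance
def pvWitness_find_available_helpers : String × Int × Int × (List (String × List (String × List String))) × (List (String × List (String × Int × Int × String))) :=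
  ("Mon", 1, 3, [("alice", [("days", ["Mon", "Tue"])]), ("bob", [("days", ["Mon"])])], [("alice", [("Mon", 0, 2, "x")])])
def Spec_find_available_helpers (target_day : String) (start_search_time : Int) (end_search_time : Int) (all_helpers : List (String × List (String × List String))) (assigned_schedules : List (String × List (String × Int × Int × String))) (out : List String) : Prop := out = find_available_helpers_alt target_day start_search_time end_search_time all_helpers assigned_schedules
instance (target_day : String) (start_search_time : Int) (end_search_time : Int) (all_helpers : List (String × List (String × List String))) (assigned_schedules : List (String × List (String × Int × Int × String))) (out : List String) : Decidable (Spec_find_available_helpers target_day start_search_time end_search_time all_helpers assigned_schedules out) := by unfold Spec_find_available_helpers; infer_instance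

-- ===== CLAIM (what is proved, stated in full; the proofs are below) =====
def Claim_equal_find_available_helpers : Prop := ∀ (target_day : String) (start_search_time : Int) (end_search_time : Int) (all_helpers : List (String × List (String × List String))) (assigned_schedules : List (String × List (String × Int × Int × String))), Dom_find_available_helpers target_day start_search_time end_search_time all_helpers assigned_schedules → Pre_find_available_helpers target_day start_search_time end_search_time all_helpers assigned_schedules → Spec_find_available_helpers target_day start_search_time end_search_time all_helpers assigned_schedules (find_available_helpers target_day start_search_time end_search_time all_helpers assigned_schedules)

-- ===== LEMMAS AND PROOFS =====

-- elements ≥ c keep their membership across the 'while busy[j] < c' advance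
theorem pv_mem_dropWhile (bs : List String) (c y : String) (hcy : c ≤ y) :
    (y ∈ bs ↔ y ∈ bs.dropWhile (fun b => decide (b < c))) := by
  conv_lhs => rw [← List.takeWhile_append_dropWhile (p := fun b => decide (b < c)) (l := bs)]
  rw [List.mem_append]
  constructor
  · rintro (h | h)
    · have := List.mem_takeWhile_imp h
      simp only [decide_eq_true_eq] at this
      exact absurd (lt_of_lt_of_le this hcy) (lt_irrefl y)
    · exact h
  · exact Or.inr

-- the merge subtraction on a ≤-sorted candidate list and a strictly sorted busy list is filtration
theorem pv_mergeSub_eq_filter (cand bs : List String)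
    (hc : cand.Pairwise (· ≤ ·)) (hb : bs.Pairwise (· < ·)) :
    pvMergeSub cand bs = cand.filter (fun x => !(bs.contains x)) := by
  induction cand generalizing bs with
  | nil => simp [pvMergeSub]
  | cons c cs ih =>
    rw [List.pairwise_cons] at hc
    obtain ⟨hcle, hcs⟩ := hc
    have hb' : (bs.dropWhile (fun b => decide (b < c))).Pairwise (· < ·) :=
      hb.sublist (List.dropWhile_sublist _)
    have hfilt : cs.filter (fun x => !(bs.contains x))
        = cs.filter (fun x => !((bs.dropWhile (fun b => decide (b < c))).contains x)) := by
      apply List.filter_congr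
      intro y hy
      have hiff := pv_mem_dropWhile bs c y (hcle y hy)
      congr 1
      rw [Bool.eq_iff_iff]
      simp only [List.contains_iff_mem]
      exact hiff
    have hcmem : (c ∈ bs) ↔ (c ∈ bs.dropWhile (fun b => decide (b < c))) :=
      pv_mem_dropWhile bs c c le_rfl
    rw [List.filter_cons]
    cases hdw : bs.dropWhile (fun b => decide (b < c)) with
    | nil =>
      rw [hdw] at hcmem hfilt hb'
      have hnc : c ∉ bs := fun h => by simpa using hcmem.mp h
      simp only [pvMergeSub, hdw]
      rw [ih [] hcs hb', hfilt]
      simp [hnc]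
    | cons b rest =>
      have hhead : ¬ (b < c) := by
        have := List.head?_dropWhile_not (p := fun b => decide (b < c)) (l := bs)
        rw [hdw] at this
        simpa using this
      rw [hdw] at hb' hcmem hfilt
      by_cases hbc : b = c
      · have hcin : c ∈ bs := hcmem.mpr (by rw [hbc]; exact List.mem_cons_self)
        have hbceq : (b == c) = true := by simp [hbc]
        simp only [pvMergeSub, hdw, hbceq, if_true]
        rw [ih (b :: rest) hcs hb', hfilt]
        simp [hcin]
      · have hclt : c < b := lt_of_le_of_ne (not_lt.mp hhead) (fun h => hbc h.symm)
        have hnc : c ∉ bs := by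
          intro h
          rcases List.mem_cons.mp (hcmem.mp h) with h' | h'
          · exact hbc h'.symm
          · rw [List.pairwise_cons] at hb'
            exact absurd (hb'.1 c h') (not_lt.mpr (le_of_lt hclt))
        have hbceq : (b == c) = false := by
          rw [Bool.eq_false_iff]; simpa using hbc
        simp only [pvMergeSub, hdw, hbceq, Bool.false_eq_true, if_neg, not_false_iff]
        rw [ih (b :: rest) hcs hb', hfilt]
        simp [hnc]

-- membership in the inner 'for sched in schedules: if overlap: unavailable.add(helper)' fold
theorem pv_inner {α κ : Type} [BEq κ] [LawfulBEq κ] (P : α → Bool) (hkey : κ) (l : List α)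
    (u : PySem.Set κ) (x : κ) :
    (x ∈ l.foldl (fun u sch => if P sch then PySem.Set.add u hkey else u) u) ↔
      x ∈ u ∨ (x = hkey ∧ l.any P = true) := by
  induction l generalizing u with
  | nil => simp
  | cons a tl ih =>
    simp only [List.foldl_cons, List.any_cons]
    by_cases hp : P a = true
    · rw [hp, if_pos rfl, ih]
      simp [PySem.Set.mem_add]
      tauto
    · rw [if_neg (by simpa using hp), ih]
      simp [Bool.not_eq_true] at hp
      simp [hp]

-- membership in A's nested fold over assigned_schedules.items()
theorem pv_outer {α κ : Type} [BEq κ] [LawfulBEq κ] (P : α → Bool) (l : List (κ × List α))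
    (u : PySem.Set κ) (x : κ) :
    (x ∈ l.foldl (fun u pr => pr.2.foldl
        (fun u sch => if P sch then PySem.Set.add u pr.1 else u) u) u) ↔
      x ∈ u ∨ ∃ pr ∈ l, x = pr.1 ∧ pr.2.any P = true := by
  induction l generalizing u with
  | nil => simp
  | cons a tl ih =>
    simp only [List.foldl_cons]
    rw [ih, pv_inner]
    simp only [List.mem_cons]
    constructor
    · rintro ((h | h) | ⟨pr, hpr, h⟩)
      · exact Or.inl h
      · exact Or.inr ⟨a, Or.inl rfl, h⟩
      · exact Or.inr ⟨pr, Or.inr hpr, h⟩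
    · rintro (h | ⟨pr, (rfl | hpr), h⟩)
      · exact Or.inl (Or.inl h)
      · exact Or.inl (Or.inr h)
      · exact Or.inr ⟨pr, hpr, h⟩

-- ===== VERDICT (by name: the statement is the Claim_ definition above) =====
theorem find_available_helpers_spec : Claim_equal_find_available_helpers := by
  intro t s e all asg _dom _pre
  unfold Spec_find_available_helpers find_available_helpers find_available_helpers_alt
  simp only []
  set candL := ((PySem.Dict.ofList all).items.filter (fun p => pvHasDay t p.2)).map (fun p => p.1) with hcandL
  set busyL := ((PySem.Dict.ofList asg).items.filter
      (fun pr => pr.2.any (pvOverlap t s e))).map (fun p => p.1) with hbusyL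
  set un := (PySem.Dict.ofList asg).items.foldl (fun u pr =>
      pr.2.foldl (fun u sch =>
        if pvOverlap t s e sch then PySem.Set.add u pr.1 else u) u) PySem.Set.empty with hun
  -- candidate names are the (nodup) keys of a dict, filtered
  have hnd_all : ((PySem.Dict.ofList all).items.map (fun p => p.1)).Nodup := by
    have h := PySem.Dict.nodup_keys_ofList all
    simpa [PySem.Dict.keys] using h
  have hndc : candL.Nodup :=
    List.Nodup.sublist (List.Sublist.map _ List.filter_sublist) hnd_all
  rw [PySem.Set.ofList_eq_self_of_nodup _ hndc]
  have hdiff : ∀ (sa sb : PySem.Set String),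
      PySem.Set.diff sa sb = sa.filter (fun x => !(PySem.Set.contains sb x)) := by
    intro sa sb; simp [PySem.Set.diff]
  rw [hdiff]
  -- B's merge subtraction is filtration of the sorted candidates by the sorted busy list
  have hcpair : (PySem.List.sorted candL (fun x => x) false).Pairwise (· ≤ ·) :=
    PySem.List.sorted_pairwise candL (fun x => x)
  have hbpair : (PySem.List.sorted (PySem.Set.ofList busyL) (fun x => x) false).Pairwise (· < ·) :=
    PySem.List.sorted_ofList_pairwise_lt busyL
  rw [pv_mergeSub_eq_filter _ _ hcpair hbpair]
  -- the two filter predicates agree: busy-list membership is A's unavailable-set membership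
  have hmem : ∀ x : String,
      ((PySem.List.sorted (PySem.Set.ofList busyL) (fun x => x) false).contains x)
        = PySem.Set.contains un x := by
    intro x
    have hiff : (x ∈ PySem.List.sorted (PySem.Set.ofList busyL) (fun x => x) false) ↔ x ∈ un := by
      rw [PySem.List.mem_sorted, PySem.Set.mem_ofList, hun, pv_outer]
      simp only [hbusyL, List.mem_map, List.mem_filter]
      constructor
      · rintro ⟨pr, ⟨hpr, hany⟩, rfl⟩
        exact Or.inr ⟨pr, hpr, rfl, hany⟩
      · rintro (h | ⟨pr, hpr, rfl, hany⟩)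
        · simp [PySem.Set.empty] at h
        · exact ⟨pr, ⟨hpr, hany⟩, rfl⟩
    rw [Bool.eq_iff_iff]
    simp only [List.contains_iff_mem]
    rw [hiff, PySem.Set.contains_iff]
  have hpred : (PySem.List.sorted candL (fun x => x) false).filter
        (fun x => !((PySem.List.sorted (PySem.Set.ofList busyL) (fun x => x) false).contains x))
      = (PySem.List.sorted candL (fun x => x) false).filter (fun x => !(PySem.Set.contains un x)) := by
    apply List.filter_congr
    intro y _
    rw [hmem]
  rw [hpred]
  -- sorted (filter p candL) = filter p (sorted candL): both are strictly increasing rearrangements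
  apply PySem.List.sorted_eq_of_perm_of_pairwise_lt
  · exact (PySem.List.sorted_perm candL (fun x => x) false).filter _
  · have hnds : (PySem.List.sorted candL (fun x => x) false).Nodup :=
      ((PySem.List.sorted_perm candL (fun x => x) false).nodup_iff).mpr hndc
    have hlt : (PySem.List.sorted candL (fun x => x) false).Pairwise (· < ·) :=
      (hcpair.and hnds).imp (fun h => lt_of_le_of_ne h.1 h.2)
    exact hlt.sublist List.filter_sublist
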